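-- pv_equiv track=rewrite | github.com/bmason72/alma_bulk_tools | alma_bulk_tools/summarize.py | _choose_weblog_landing
-- ===== SOURCE A (Python) =====
-- def _choose_weblog_landing(candidates: list[str]) -> str | None:
--     if not candidates:
--         return None
--     sorted_paths = sorted(candidates)
--     index_matches = [p for p in sorted_paths if p.lower().endswith("/index.html")]
--     if index_matches:
--         return index_matches[0]
--     t1_matches = [p for p in sorted_paths if p.lower().endswith("/t1-1.html")]
--     if t1_matches:
--         return t1_matches[0]
--     return sorted_paths[0]
-- ===== SOURCE B (Python) =====
-- def _choose_weblog_landing(candidates: list[str]) -> str | None: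
--     best_index = None
--     best_t1 = None
--     best_any = None
--     for p in candidates:
--         pl = p.lower()
--         if pl.endswith("/index.html"):
--             if best_index is None or p < best_index:
--                 best_index = p
--         elif pl.endswith("/t1-1.html"):
--             if best_t1 is None or p < best_t1:
--                 best_t1 = p
--         if best_any is None or p < best_any:
--             best_any = p
--     if best_index is not None:
--         return best_index
--     if best_t1 is not None:
--         return best_t1
--     return best_any
-- ===== Notes on version B (the rewrite author's own statement) =====
-- stated objective: alternative
-- what changed: Replaces sort-then-filter-three-times with a single pass that tracks the lexicographic minimum of each priority category (index.html match, t1-1.html match, any); O(n) instead of O(n log n), though a timing run did not confirm a >=1.5x win.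
import Mathlib
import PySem

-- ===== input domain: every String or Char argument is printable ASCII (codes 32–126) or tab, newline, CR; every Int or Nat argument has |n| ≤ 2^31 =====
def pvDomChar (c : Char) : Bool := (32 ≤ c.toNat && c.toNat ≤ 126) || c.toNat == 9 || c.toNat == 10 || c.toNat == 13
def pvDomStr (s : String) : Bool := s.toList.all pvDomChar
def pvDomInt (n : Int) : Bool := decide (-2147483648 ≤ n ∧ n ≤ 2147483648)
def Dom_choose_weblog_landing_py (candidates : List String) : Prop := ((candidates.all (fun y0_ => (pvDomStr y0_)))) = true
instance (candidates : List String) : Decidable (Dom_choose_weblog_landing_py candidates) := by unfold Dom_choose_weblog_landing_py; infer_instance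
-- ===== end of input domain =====

-- B replaces A's sort + three filter passes by one pass tracking the minimum of each
-- priority category (an alternative single-pass algorithm; no measured speed claim).

-- ===== PORT A =====
def choose_weblog_landing_py (candidates : List String) : Option String :=
  if candidates = [] then none
  else
    let sorted_paths := PySem.List.sorted candidates (fun x => x) false
    let index_matches := sorted_paths.filter
      (fun p => PySem.Str.endswith (PySem.Str.lower p) "/index.html")
    match index_matches with
    | p :: _ => some p
    | [] =>
      let t1_matches := sorted_paths.filter
        (fun p => PySem.Str.endswith (PySem.Str.lower p) "/t1-1.html")
      match t1_matches with
      | p :: _ => some p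
      | [] => PySem.List.pyGet? sorted_paths 0   -- sorted_paths[0]; in range since candidates ≠ []

-- ===== PORT B =====
-- 'best = p if best is None or p < best else best'
def pvMinUpd (best : Option String) (p : String) : Option String :=
  match best with
  | none => some p
  | some b => if p < b then some p else some b

def choose_weblog_landing_py_alt (candidates : List String) : Option String :=
  let st := candidates.foldl
    (fun (st : Option String × Option String × Option String) p =>
      let pl := PySem.Str.lower p
      let st1 :=
        if PySem.Str.endswith pl "/index.html" then (pvMinUpd st.1 p, st.2.1, st.2.2)
        else if PySem.Str.endswith pl "/t1-1.html" then (st.1, pvMinUpd st.2.1 p, st.2.2)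
        else st
      (st1.1, st1.2.1, pvMinUpd st1.2.2 p))
    (none, none, none)
  match st.1 with
  | some b => some b
  | none =>
    match st.2.1 with
    | some b => some b
    | none => st.2.2

-- ===== PRECONDITION & SPEC =====
def Spec_choose_weblog_landing_py (candidates : List String) (out : Option String) : Prop := out = choose_weblog_landing_py_alt candidates
instance (candidates : List String) (out : Option String) : Decidable (Spec_choose_weblog_landing_py candidates out) := by unfold Spec_choose_weblog_landing_py; infer_instance

-- ===== CLAIM (what is proved, stated in full; the proofs are below) =====
def Claim_equal_choose_weblog_landing_py : Prop := ∀ (candidates : List String), Dom_choose_weblog_landing_py candidates → Spec_choose_weblog_landing_py candidates (choose_weblog_landing_py candidates)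

-- ===== LEMMAS AND PROOFS =====

-- predicates, proof-local abbreviations
def pvPIdx (p : String) : Bool := PySem.Str.endswith (PySem.Str.lower p) "/index.html"
def pvPT1 (p : String) : Bool := PySem.Str.endswith (PySem.Str.lower p) "/t1-1.html"

-- the three per-component step functions of B's fold
def pvS1 (a : Option String) (p : String) : Option String := if pvPIdx p then pvMinUpd a p else a
def pvS2 (b : Option String) (p : String) : Option String :=
  if pvPIdx p then b else if pvPT1 p then pvMinUpd b p else b
def pvS3 (c : Option String) (p : String) : Option String := pvMinUpd c p

lemma pv_triple_fold (xs : List String) :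
    ∀ (a b c : Option String),
      xs.foldl
        (fun (st : Option String × Option String × Option String) p =>
          let pl := PySem.Str.lower p
          let st1 :=
            if PySem.Str.endswith pl "/index.html" then (pvMinUpd st.1 p, st.2.1, st.2.2)
            else if PySem.Str.endswith pl "/t1-1.html" then (st.1, pvMinUpd st.2.1 p, st.2.2)
            else st
          (st1.1, st1.2.1, pvMinUpd st1.2.2 p)) (a, b, c)
      = (xs.foldl pvS1 a, xs.foldl pvS2 b, xs.foldl pvS3 c) := by
  induction xs with
  | nil => intro a b c; rfl
  | cons x t ih =>
    intro a b c
    simp only [List.foldl_cons]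
    have hstep :
      (let pl := PySem.Str.lower x
       let st1 :=
         if PySem.Str.endswith pl "/index.html" then
           (pvMinUpd ((a,b,c) : Option String × Option String × Option String).1 x, (a,b,c).2.1, (a,b,c).2.2)
         else if PySem.Str.endswith pl "/t1-1.html" then ((a,b,c).1, pvMinUpd (a,b,c).2.1 x, (a,b,c).2.2)
         else (a,b,c)
       ((st1.1, st1.2.1, pvMinUpd st1.2.2 x) : Option String × Option String × Option String))
      = (pvS1 a x, pvS2 b x, pvS3 c x) := by
      simp only [pvS1, pvS2, pvS3, pvPIdx, pvPT1]
      by_cases h1 : PySem.Str.endswith (PySem.Str.lower x) "/index.html" = true <;>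
        by_cases h2 : PySem.Str.endswith (PySem.Str.lower x) "/t1-1.html" = true <;>
        simp only [h1, h2, if_true, if_false, Bool.false_eq_true]
    rw [hstep]
    exact ih _ _ _

-- the conditional folds are the folds over the filtered lists
lemma pv_s1_filter (xs : List String) (a : Option String) :
    xs.foldl pvS1 a = (xs.filter pvPIdx).foldl pvMinUpd a := by
  induction xs generalizing a with
  | nil => rfl
  | cons x t ih =>
    by_cases h : pvPIdx x <;> simp [pvS1, h, ih]
lemma pv_s2_filter (xs : List String) (b : Option String) :
    xs.foldl pvS2 b = (xs.filter (fun p => !pvPIdx p && pvPT1 p)).foldl pvMinUpd b := by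
  induction xs generalizing b with
  | nil => rfl
  | cons x t ih =>
    by_cases h1 : pvPIdx x <;> by_cases h2 : pvPT1 x <;>
      simp [pvS2, h1, h2, ih]
lemma pv_s3_fold (xs : List String) (c : Option String) :
    xs.foldl pvS3 c = xs.foldl pvMinUpd c := rfl

-- the running-min fold from a `some` state returns the minimum value
lemma pv_fold_min_spec (xs : List String) :
    ∀ (b : String), ∃ v, xs.foldl pvMinUpd (some b) = some v ∧
      v ∈ b :: xs ∧ ∀ y ∈ b :: xs, v ≤ y := by
  induction xs with
  | nil =>
    intro b
    exact ⟨b, rfl, by simp, by simp⟩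
  | cons x t ih =>
    intro b
    simp only [List.foldl_cons, pvMinUpd]
    by_cases h : x < b
    · simp only [if_pos h]
      obtain ⟨v, hv, hmem, hmin⟩ := ih x
      refine ⟨v, hv, List.mem_cons_of_mem b hmem, ?_⟩
      intro y hy
      rcases List.mem_cons.1 hy with rfl | hy'
      · exact le_trans (hmin x (by simp)) h.le
      · exact hmin y hy'
    · simp only [if_neg h]
      obtain ⟨v, hv, hmem, hmin⟩ := ih b
      refine ⟨v, hv, ?_, ?_⟩
      · rcases List.mem_cons.1 hmem with rfl | hy'
        · simp
        · exact List.mem_cons_of_mem _ (List.mem_cons_of_mem _ hy')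
      · intro y hy
        rcases List.mem_cons.1 hy with rfl | hy'
        · exact hmin y (by simp)
        · rcases List.mem_cons.1 hy' with rfl | hy''
          · exact le_trans (hmin b (by simp)) (not_lt.1 h)
          · exact hmin y (List.mem_cons_of_mem _ hy'')

-- head of a sorted (Pairwise ≤) rearrangement equals the running-min fold over the original
lemma pv_head_eq_fold (ys zs : List String) (hp : ys.Pairwise (· ≤ ·)) (hperm : ys.Perm zs) :
    ys.head? = zs.foldl pvMinUpd none := by
  cases zs with
  | nil => rw [List.Perm.eq_nil hperm]; rfl
  | cons z t =>
    have hys : ys ≠ [] := by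
      intro h; subst h; exact (List.cons_ne_nil z t) hperm.symm.eq_nil
    obtain ⟨m, ms, rfl⟩ := List.exists_cons_of_ne_nil hys
    obtain ⟨v, hv, hmem, hmin⟩ := pv_fold_min_spec t z
    simp only [List.foldl_cons, pvMinUpd, hv, List.head?_cons]
    have hvys : v ∈ m :: ms := hperm.symm.subset hmem
    have hmzs : m ∈ z :: t := hperm.subset (by simp)
    have h1 : v ≤ m := hmin m hmzs
    have h2 : m ≤ v := by
      rcases List.mem_cons.1 hvys with rfl | hv'
      · exact le_refl _
      · exact (List.pairwise_cons.1 hp).1 v hv'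
    exact congrArg some (le_antisymm h1 h2).symm

-- head of sorted-then-filtered equals running min of the filtered original list
lemma pv_head_sorted_filter (xs : List String) (p : String → Bool) :
    ((PySem.List.sorted xs (fun x => x) false).filter p).head?
      = (xs.filter p).foldl pvMinUpd none := by
  apply pv_head_eq_fold
  · exact (PySem.List.sorted_pairwise xs (fun x => x)).filter p
  · exact (PySem.List.sorted_perm xs (fun x => x) false).filter p

-- head of sorted equals running min of the whole list
lemma pv_head_sorted (xs : List String) :
    (PySem.List.sorted xs (fun x => x) false).head?
      = xs.foldl pvMinUpd none := by
  apply pv_head_eq_fold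
  · exact PySem.List.sorted_pairwise xs (fun x => x)
  · exact PySem.List.sorted_perm xs (fun x => x) false

lemma pv_pyGet_zero (ys : List String) : PySem.List.pyGet? ys 0 = ys.head? := by
  cases ys <;> simp [PySem.List.pyGet?, PySem.List.pyIdx?]

-- a nonempty fold yields some; an empty fold yields none
lemma pv_fold_ne_none (z : String) (t : List String) :
    ∃ v, (z :: t).foldl pvMinUpd none = some v := by
  simp only [List.foldl_cons, pvMinUpd]
  obtain ⟨v, hv, _, _⟩ := pv_fold_min_spec t z
  exact ⟨v, hv⟩

-- when no element matches pvPIdx, A's second filter equals B's elif-filter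
lemma pv_t1_filter_eq (xs : List String) (h : xs.filter pvPIdx = []) :
    xs.filter pvPT1 = xs.filter (fun p => !pvPIdx p && pvPT1 p) := by
  have hnone : ∀ x ∈ xs, pvPIdx x = false := by
    intro x hx
    by_contra hc
    have : x ∈ xs.filter pvPIdx := List.mem_filter.2 ⟨hx, by simpa using hc⟩
    simp [h] at this
  apply List.filter_congr
  intro x hx
  simp [hnone x hx]

-- the head of a filtered-sorted list, from the fold value
lemma pv_sorted_filter_eq_cons (xs : List String) (p : String → Bool) (v : String)
    (hv : (xs.filter p).foldl pvMinUpd none = some v) :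
    ∃ tl, (PySem.List.sorted xs (fun x => x) false).filter p = v :: tl := by
  have hh := pv_head_sorted_filter xs p
  rw [hv] at hh
  cases hc : (PySem.List.sorted xs (fun x => x) false).filter p with
  | nil => rw [hc] at hh; simp at hh
  | cons a b =>
    rw [hc] at hh
    simp only [List.head?_cons, Option.some.injEq] at hh
    exact ⟨b, by rw [hh]⟩

lemma pv_sorted_filter_eq_nil (xs : List String) (p : String → Bool)
    (h : xs.filter p = []) :
    (PySem.List.sorted xs (fun x => x) false).filter p = [] := by
  have hh := pv_head_sorted_filter xs p
  rw [h] at hh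
  cases hc : (PySem.List.sorted xs (fun x => x) false).filter p with
  | nil => rfl
  | cons a b => rw [hc] at hh; simp at hh

-- ===== VERDICT (by name: the statement is the Claim_ definition above) =====
theorem choose_weblog_landing_py_spec : Claim_equal_choose_weblog_landing_py := by
  intro candidates _
  unfold Spec_choose_weblog_landing_py
  unfold choose_weblog_landing_py choose_weblog_landing_py_alt
  rw [pv_triple_fold candidates none none none]
  simp only [pv_s1_filter, pv_s2_filter, pv_s3_fold]
  rw [show (fun p => PySem.Str.endswith (PySem.Str.lower p) "/index.html") = pvPIdx from rfl,
     show (fun p => PySem.Str.endswith (PySem.Str.lower p) "/t1-1.html") = pvPT1 from rfl]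
  by_cases hnil : candidates = []
  · subst hnil; rfl
  · simp only [hnil, if_false]
    by_cases h1 : candidates.filter pvPIdx = []
    · rw [pv_sorted_filter_eq_nil candidates pvPIdx h1, h1]
      simp only [List.foldl_nil]
      rw [← pv_t1_filter_eq candidates h1]
      by_cases h2 : candidates.filter pvPT1 = []
      · rw [pv_sorted_filter_eq_nil candidates pvPT1 h2, h2]
        simp only [List.foldl_nil]
        rw [pv_pyGet_zero, pv_head_sorted]
      · obtain ⟨z, t, hzt⟩ := List.exists_cons_of_ne_nil h2
        have hfold : ∃ v, (candidates.filter pvPT1).foldl pvMinUpd none = some v := by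
          rw [hzt]; exact pv_fold_ne_none z t
        obtain ⟨v, hv⟩ := hfold
        obtain ⟨tl, htl⟩ := pv_sorted_filter_eq_cons candidates pvPT1 v hv
        rw [htl, hv]
    · obtain ⟨z, t, hzt⟩ := List.exists_cons_of_ne_nil h1
      have hfold : ∃ v, (candidates.filter pvPIdx).foldl pvMinUpd none = some v := by
        rw [hzt]; exact pv_fold_ne_none z t
      obtain ⟨v, hv⟩ := hfold
      obtain ⟨tl, htl⟩ := pv_sorted_filter_eq_cons candidates pvPIdx v hv
      rw [htl, hv]
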